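-- pv_equiv track=rewrite | github.com/glennfeys/Discrete-algorithms | project_4/tibo_glenn/grayCode.py | grayCodeRank
-- ===== SOURCE A (Python) =====
-- def grayCodeRank(n, T):
--     r = 0
--     b = 0
--     for i in range(n - 1, -1, -1):
--         if n - i in T:
--             b = 1 - b
--         if b == 1:
--             r += (2**i)
--     return r
-- ===== SOURCE B (Python) =====
-- def grayCodeRank(n, T):
--     # flip positions in increasing order; parity is odd exactly on the
--     # intervals [S[0], S[1]-1], [S[2], S[3]-1], ..., with a trailing
--     # interval ending at n when len(S) is odd.
--     S = [p for p in range(1, n + 1) if p in T]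
--     total = 0
--     while S:
--         lo = S[0]
--         if len(S) == 1:
--             hi = n
--             S = []
--         else:
--             hi = S[1] - 1
--             S = S[2:]
--         # sum of 2**(n-p) for p in [lo, hi], as a closed form
--         total += 2 ** (n - lo + 1) - 2 ** (n - hi)
--     return total
-- ===== Notes on version B (the rewrite author's own statement) =====
-- stated objective: alternative
-- what changed: Instead of walking all n bit positions while toggling a parity flag and adding 2**i bit by bit, B collects the sorted flip positions S = [p in 1..n with p in T] and sums one closed-form geometric term 2**(n-lo+1) - 2**(n-hi) per odd-parity interval.
import Mathlib
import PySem

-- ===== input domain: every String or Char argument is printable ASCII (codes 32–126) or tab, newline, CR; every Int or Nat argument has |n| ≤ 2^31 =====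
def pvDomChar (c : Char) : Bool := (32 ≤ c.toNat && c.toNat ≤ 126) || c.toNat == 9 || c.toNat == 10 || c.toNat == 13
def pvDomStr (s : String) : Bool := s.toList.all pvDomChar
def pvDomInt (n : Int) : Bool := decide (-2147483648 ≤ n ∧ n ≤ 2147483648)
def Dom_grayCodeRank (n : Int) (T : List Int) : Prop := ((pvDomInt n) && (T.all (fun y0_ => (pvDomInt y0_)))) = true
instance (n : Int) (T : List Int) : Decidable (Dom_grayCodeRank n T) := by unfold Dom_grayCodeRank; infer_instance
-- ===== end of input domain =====

-- B replaces A's per-bit parity walk by a closed-form geometric sum over the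
-- odd-parity intervals between flip positions (objective: alternative algorithm).

-- ===== PORT A =====
-- one loop iteration: flip b when n - i ∈ T, then add 2**i while b = 1
def grayStepI (n : Int) (T : List Int) (s : Int × Int) (i : Int) : Int × Int :=
  let b := if (n - i) ∈ T then 1 - s.2 else s.2
  (if b = 1 then s.1 + 2 ^ i.toNat else s.1, b)

def grayCodeRank (n : Int) (T : List Int) : Int :=
  ((PySem.List.pyRange (n - 1) (-1) (-1)).foldl (grayStepI n T) (0, 0)).1

-- ===== PORT B =====
-- Source B's while loop: each odd-parity interval [lo, hi] adds 2**(n-lo+1) - 2**(n-hi)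
def grayGo (n : Int) (total : Int) : List Int → Int
  | [] => total
  | [lo] => grayGo n (total + (2 ^ (n - lo + 1).toNat - 2 ^ (n - n).toNat)) []
  | lo :: hi1 :: rest =>
      grayGo n (total + (2 ^ (n - lo + 1).toNat - 2 ^ (n - (hi1 - 1)).toNat)) rest

def grayCodeRank_alt (n : Int) (T : List Int) : Int :=
  grayGo n 0 ((PySem.List.pyRange 1 (n + 1) 1).filter (fun p => p ∈ T))

-- ===== PRECONDITION & SPEC =====
def Spec_grayCodeRank (n : Int) (T : List Int) (out : Int) : Prop := out = grayCodeRank_alt n T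
instance (n : Int) (T : List Int) (out : Int) : Decidable (Spec_grayCodeRank n T out) := by unfold Spec_grayCodeRank; infer_instance

-- ===== CLAIM (what is proved, stated in full; the proofs are below) =====
def Claim_equal_grayCodeRank : Prop := ∀ (n : Int) (T : List Int), Dom_grayCodeRank n T → Spec_grayCodeRank n T (grayCodeRank n T)

-- ===== LEMMAS AND PROOFS =====

-- A's step, re-indexed by the flip position p = n - i
def grayStepP (n : Int) (T : List Int) (s : Int × Int) (p : Int) : Int × Int :=
  let b := if p ∈ T then 1 - s.2 else s.2
  (if b = 1 then s.1 + 2 ^ (n - p).toNat else s.1, b)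

lemma grayStepI_eq (n : Int) (T : List Int) (s : Int × Int) (p : Int) :
    grayStepI n T s (n - p) = grayStepP n T s p := by
  unfold grayStepI grayStepP
  have h : n - (n - p) = p := by ring
  rw [h]

lemma grayGo_acc (n : Int) : ∀ (S : List Int) (t : Int), grayGo n t S = t + grayGo n 0 S
  | [], t => by simp [grayGo]
  | [lo], t => by simp [grayGo]
  | lo :: hi1 :: rest, t => by
      rw [grayGo, grayGo,
        grayGo_acc n rest (t + (2 ^ (n - lo + 1).toNat - 2 ^ (n - (hi1 - 1)).toNat)),
        grayGo_acc n rest (0 + (2 ^ (n - lo + 1).toNat - 2 ^ (n - (hi1 - 1)).toNat))]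
      ring

lemma pow2_succ_int (a : Int) (h : 0 ≤ a) : (2:Int) ^ (a + 1).toNat = 2 * 2 ^ a.toNat := by
  have h1 : (a + 1).toNat = a.toNat + 1 := by omega
  rw [h1, pow_succ]; ring

lemma grayGo_shift (n k : Int) (F : List Int) (hk : k ≤ n)
    (hF : ∀ h ∈ F, k + 1 ≤ h ∧ h ≤ n) :
    grayGo n 0 (k :: F) = 2 ^ (n - k).toNat + grayGo n 0 ((k + 1) :: F) := by
  cases F with
  | nil =>
      simp only [grayGo]
      have h1 : n - k + 1 = (n - k) + 1 := by ring
      have h2 : n - (k + 1) + 1 = n - k := by ring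
      rw [h1, h2, pow2_succ_int (n - k) (by omega)]
      ring
  | cons h F' =>
      obtain ⟨hh1, hh2⟩ := hF h (by simp)
      simp only [grayGo]
      rw [grayGo_acc n F' (0 + (2 ^ (n - k + 1).toNat - 2 ^ (n - (h - 1)).toNat)),
        grayGo_acc n F' (0 + (2 ^ (n - (k + 1) + 1).toNat - 2 ^ (n - (h - 1)).toNat))]
      have h1 : n - k + 1 = (n - k) + 1 := by ring
      have h2 : n - (k + 1) + 1 = n - k := by ring
      rw [h1, h2, pow2_succ_int (n - k) (by omega)]
      ring

lemma grayGo_cancel (n k : Int) (F : List Int) :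
    grayGo n 0 (k :: k :: F) = grayGo n 0 F := by
  simp only [grayGo]
  rw [grayGo_acc n F (0 + (2 ^ (n - k + 1).toNat - 2 ^ (n - (k - 1)).toNat))]
  have h : n - (k - 1) = n - k + 1 := by ring
  rw [h]
  ring

lemma gray_loop (n : Int) (T : List Int) :
    ∀ (m : Nat) (k : Int), 1 ≤ k → (n + 1 - k).toNat = m → ∀ r : Int,
      (((PySem.List.pyRange k (n + 1) 1).foldl (grayStepP n T) (r, 0)).1
          = r + grayGo n 0 ((PySem.List.pyRange k (n + 1) 1).filter (fun p => p ∈ T))) ∧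
      (((PySem.List.pyRange k (n + 1) 1).foldl (grayStepP n T) (r, 1)).1
          = r + grayGo n 0 (k :: (PySem.List.pyRange k (n + 1) 1).filter (fun p => p ∈ T))) := by
  intro m
  induction m with
  | zero =>
      intro k hk hm r
      have hnk : n + 1 ≤ k := by omega
      rw [PySem.List.pyRange_one_eq_nil hnk]
      constructor
      · simp [grayGo]
      · simp only [List.filter_nil, List.foldl_nil, grayGo]
        have h0 : (n - k + 1).toNat = 0 := by omega
        have h1 : n - n = 0 := by ring
        rw [h0, h1]
        simp
  | succ m ih =>
      intro k hk hm r
      have hkn : k < n + 1 := by omega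
      rw [PySem.List.pyRange_one_cons hkn]
      have hm' : (n + 1 - (k + 1)).toNat = m := by omega
      have hFmem : ∀ h ∈ (PySem.List.pyRange (k + 1) (n + 1) 1).filter (fun p => p ∈ T),
          k + 1 ≤ h ∧ h ≤ n := by
        intro h hh
        have := List.mem_filter.mp hh
        have hr := (PySem.List.mem_pyRange_one).mp this.1
        omega
      by_cases hkT : k ∈ T
      · constructor
        · -- b = 0, k flips: parity becomes 1, bit added
          have hstep : grayStepP n T (r, 0) k = (r + 2 ^ (n - k).toNat, 1) := by
            simp [grayStepP, hkT]
          rw [List.foldl_cons, hstep, (ih (k + 1) (by omega) hm' (r + 2 ^ (n - k).toNat)).2,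
            List.filter_cons_of_pos (by simpa using hkT),
            grayGo_shift n k _ (by omega) hFmem]
          ring
        · -- b = 1, k flips: parity becomes 0, nothing added
          have hstep : grayStepP n T (r, 1) k = (r, 0) := by
            simp [grayStepP, hkT]
          rw [List.foldl_cons, hstep, (ih (k + 1) (by omega) hm' r).1,
            List.filter_cons_of_pos (by simpa using hkT),
            grayGo_cancel]
      · constructor
        · -- b = 0, no flip, nothing added
          have hstep : grayStepP n T (r, 0) k = (r, 0) := by
            simp [grayStepP, hkT]
          rw [List.foldl_cons, hstep, (ih (k + 1) (by omega) hm' r).1,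
            List.filter_cons_of_neg (by simpa using hkT)]
        · -- b = 1, no flip, bit added
          have hstep : grayStepP n T (r, 1) k = (r + 2 ^ (n - k).toNat, 1) := by
            simp [grayStepP, hkT]
          rw [List.foldl_cons, hstep, (ih (k + 1) (by omega) hm' (r + 2 ^ (n - k).toNat)).2,
            List.filter_cons_of_neg (by simpa using hkT),
            grayGo_shift n k _ (by omega) hFmem]
          ring

lemma grayCodeRank_eq_foldP (n : Int) (T : List Int) :
    grayCodeRank n T = ((PySem.List.pyRange 1 (n + 1) 1).foldl (grayStepP n T) (0, 0)).1 := by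
  unfold grayCodeRank
  have hrange : PySem.List.pyRange (n - 1) (-1) (-1)
      = (PySem.List.pyRange 1 (n + 1) 1).map (fun p => n - p) := by
    rw [PySem.List.pyRange_neg_one, PySem.List.pyRange_one, List.map_map]
    have h1 : n - 1 - (-1) = n := by ring
    have h2 : n + 1 - 1 = n := by ring
    rw [h1, h2]
    apply List.map_congr_left
    intro k _
    simp only [Function.comp]
    ring
  rw [hrange, List.foldl_map]
  have hfun : (fun (x : Int × Int) y => grayStepI n T x (n - y)) = grayStepP n T := by
    funext s p; exact grayStepI_eq n T s p
  rw [hfun]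

-- ===== VERDICT (by name: the statement is the Claim_ definition above) =====
theorem grayCodeRank_spec : Claim_equal_grayCodeRank := by
  intro n T _
  unfold Spec_grayCodeRank grayCodeRank_alt
  rw [grayCodeRank_eq_foldP]
  exact (gray_loop n T (n + 1 - 1).toNat 1 le_rfl rfl 0).1.trans (by ring_nf)
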